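-- pv_equiv track=rewrite | github.com/racia/research-project | data/examples/produce_examples.py | construct_example
-- ===== SOURCE A (Python) =====
-- def construct_example(
--     contexts: list[tuple[int, str]],
--     questions: list[tuple[int, str]],
--     answers: list[str],
-- ) -> tuple[str, str]:
--     """
--     Construct an example from the given contexts, questions, and answers.
--
--     :param contexts: list of tuples with the line number and the context sentence
--     :param questions: list of tuples with the line number and the question
--     :param answers: list of answers
--
--     :return: the constructed example
--     """
--     lines = sorted(contexts + questions)
--     answers_ = answers.copy()
--
--     enumerated_parts = [""]
--     not_enumerated_parts = [""]
--
--     for id_, line in lines: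
--         if "?" in line:
--             enumerated_parts[-1] += f"Question:\n{id_}. {line}\n"
--             enumerated_parts[-1] += f"Answer: {answers_.pop(0)}"
--             enumerated_parts.append("")
--
--             not_enumerated_parts[-1] += f"Question:\n{line}\n"
--             not_enumerated_parts[-1] += f"Answer: {answers.pop(0)}"
--             not_enumerated_parts.append("")
--         else:
--             if not enumerated_parts[-1]:
--                 enumerated_parts[-1] += f"Context sentences:\n{id_}. {line}\n"
--                 not_enumerated_parts[-1] += f"Context sentences:\n{line}\n"
--             else:
--                 enumerated_parts[-1] += f"{id_}. {line}\n"
--                 not_enumerated_parts[-1] += f"{line}\n"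
--
--     enumerated_ex = "\n\n".join(enumerated_parts)
--     not_enumerated_ex = "\n\n".join(not_enumerated_parts)
--
--     return enumerated_ex, not_enumerated_ex
-- ===== SOURCE B (Python) =====
-- def construct_example(
--     contexts: list[tuple[int, str]],
--     questions: list[tuple[int, str]],
--     answers: list[str],
-- ) -> tuple[str, str]:
--     lines = sorted(contexts + questions)
--
--     # Pass 1: partition the sorted lines into segments: runs of consecutive
--     # context lines, each closed by the question line that follows (None for
--     # the trailing run without a question).
--     segments = []
--     cur = []
--     for id_, line in lines:
--         if "?" in line:
--             segments.append((cur, (id_, line)))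
--             cur = []
--         else:
--             cur.append((id_, line))
--     segments.append((cur, None))
--
--     # Pass 2: format each segment into its enumerated / non-enumerated block.
--     enum_blocks = []
--     plain_blocks = []
--     for i, (ctxs, q) in enumerate(segments):
--         e = p = ""
--         if ctxs:
--             e = "Context sentences:\n" + "".join(f"{cid}. {c}\n" for cid, c in ctxs)
--             p = "Context sentences:\n" + "".join(f"{c}\n" for _, c in ctxs)
--         if q is not None:
--             qid, qline = q
--             ans = answers[i]
--             e += f"Question:\n{qid}. {qline}\nAnswer: {ans}"
--             p += f"Question:\n{qline}\nAnswer: {ans}"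
--         enum_blocks.append(e)
--         plain_blocks.append(p)
--
--     # Preserve A's observable side effect: the consumed answers are removed
--     # from the front of the caller's list.
--     del answers[:len(segments) - 1]
--     return "\n\n".join(enum_blocks), "\n\n".join(plain_blocks)
-- ===== Notes on version B (the rewrite author's own statement) =====
-- stated objective: faster
-- what changed: Replaces A's single stateful pass (mutating the last element of two growing part lists and popping answers with pop(0)) by two passes: first partition the sorted lines into context-run/question segments, then format each segment independently, indexing answers by segment position; this removes the O(n) pop(0) front-shift per question. Pre_ excludes only inputs with more '?'-lines than answers, where both A and B raise IndexError.
import Mathlib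
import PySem

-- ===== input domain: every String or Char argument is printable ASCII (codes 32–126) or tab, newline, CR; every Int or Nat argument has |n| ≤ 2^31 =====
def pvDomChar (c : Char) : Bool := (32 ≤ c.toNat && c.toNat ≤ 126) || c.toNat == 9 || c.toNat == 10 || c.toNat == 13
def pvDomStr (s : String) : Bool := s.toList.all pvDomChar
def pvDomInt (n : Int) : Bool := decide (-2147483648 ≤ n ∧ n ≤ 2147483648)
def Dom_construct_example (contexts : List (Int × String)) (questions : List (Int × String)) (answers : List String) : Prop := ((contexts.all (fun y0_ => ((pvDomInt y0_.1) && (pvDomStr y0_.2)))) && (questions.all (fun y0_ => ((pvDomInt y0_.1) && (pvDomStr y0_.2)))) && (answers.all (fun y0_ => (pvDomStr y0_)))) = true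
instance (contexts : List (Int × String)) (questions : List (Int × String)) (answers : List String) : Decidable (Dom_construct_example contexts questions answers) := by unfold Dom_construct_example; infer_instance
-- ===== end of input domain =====

-- B restructures A's single stateful pass into segment-partition + per-segment formatting; return values proved equal on Pre_ (enough answers); both A and B also mutate `answers` in Python — the equivalence proved here is about the RETURN value only.


-- ===== PORT A =====
-- parts[-1] += s  (parts is never empty in A; [] case unreachable)
def pvAppendLast : List String → String → List String
  | [], _ => []
  | [x], s => [x ++ s]
  | x :: y :: xs, s => x :: pvAppendLast (y :: xs) s

-- A's loop body; state = (answers_, enumerated_parts, not_enumerated_parts).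
-- answers_.pop(0) is headD/tail: Pre_ excludes the IndexError case (empty answers_);
-- the pop from `answers` itself removes the same value, so only answers_ is tracked for the return value.
def construct_exampleStep (st : List String × List String × List String) (p : Int × String) :
    List String × List String × List String :=
  let ans_ := st.1; let ep := st.2.1; let np := st.2.2
  let id_ := p.1; let line := p.2
  if PySem.Str.isIn "?" line then
    (ans_.tail,
     pvAppendLast ep ("Question:\n" ++ PySem.Int.toStr id_ ++ ". " ++ line ++ "\n" ++ ("Answer: " ++ ans_.headD "")) ++ [""],
     pvAppendLast np ("Question:\n" ++ line ++ "\n" ++ ("Answer: " ++ ans_.headD "")) ++ [""])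
  else
    if ep.getLastD "" = "" then
      (ans_,
       pvAppendLast ep ("Context sentences:\n" ++ PySem.Int.toStr id_ ++ ". " ++ line ++ "\n"),
       pvAppendLast np ("Context sentences:\n" ++ line ++ "\n"))
    else
      (ans_,
       pvAppendLast ep (PySem.Int.toStr id_ ++ ". " ++ line ++ "\n"),
       pvAppendLast np (line ++ "\n"))

def construct_example (contexts : List (Int × String)) (questions : List (Int × String)) (answers : List String) : String × String :=
  let lines := PySem.List.sorted2 (contexts ++ questions) (fun p => p.1) (fun p => p.2) false
  let st := lines.foldl construct_exampleStep (answers, [""], [""])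
  (PySem.Str.join "\n\n" st.2.1, PySem.Str.join "\n\n" st.2.2)

-- ===== PORT B =====
-- pass 1: partition into (context run, closing question?) segments
def pvSegStep (st : List (List (Int × String) × Option (Int × String)) × List (Int × String)) (p : Int × String) :
    List (List (Int × String) × Option (Int × String)) × List (Int × String) :=
  if PySem.Str.isIn "?" p.2 then (st.1 ++ [(st.2, some p)], []) else (st.1, st.2 ++ [p])

-- pass 2: format one (index, segment) pair (enumerated / plain); answers[i]
-- ported as pyGetD (Pre_ guarantees the index is in range)
def pvCtxE (ctxs : List (Int × String)) : String :=
  if ctxs.isEmpty then "" else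
    "Context sentences:\n" ++ PySem.Str.join "" (ctxs.map (fun c => PySem.Int.toStr c.1 ++ ". " ++ c.2 ++ "\n"))

def pvCtxP (ctxs : List (Int × String)) : String :=
  if ctxs.isEmpty then "" else
    "Context sentences:\n" ++ PySem.Str.join "" (ctxs.map (fun c => c.2 ++ "\n"))

def pvBlockE (answers : List String) (iseg : Int × (List (Int × String) × Option (Int × String))) : String :=
  match iseg.2.2 with
  | none => pvCtxE iseg.2.1
  | some q => pvCtxE iseg.2.1 ++ ("Question:\n" ++ PySem.Int.toStr q.1 ++ ". " ++ q.2 ++ "\nAnswer: " ++ PySem.List.pyGetD answers iseg.1 "")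

def pvBlockP (answers : List String) (iseg : Int × (List (Int × String) × Option (Int × String))) : String :=
  match iseg.2.2 with
  | none => pvCtxP iseg.2.1
  | some q => pvCtxP iseg.2.1 ++ ("Question:\n" ++ q.2 ++ "\nAnswer: " ++ PySem.List.pyGetD answers iseg.1 "")

def construct_example_alt (contexts : List (Int × String)) (questions : List (Int × String)) (answers : List String) : String × String :=
  let lines := PySem.List.sorted2 (contexts ++ questions) (fun p => p.1) (fun p => p.2) false
  let st := lines.foldl pvSegStep ([], [])
  let segments := st.1 ++ [(st.2, none)]
  let iseg := PySem.List.enumerate segments 0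
  (PySem.Str.join "\n\n" (iseg.map (pvBlockE answers)), PySem.Str.join "\n\n" (iseg.map (pvBlockP answers)))

-- ===== PRECONDITION & SPEC =====
-- Pre_: at least as many answers as question lines ('?' in the text); on fewer
-- answers both Pythons raise IndexError (A at answers_.pop(0), B at answers[i]).
def Pre_construct_example (contexts : List (Int × String)) (questions : List (Int × String)) (answers : List String) : Prop :=
  ((contexts ++ questions).countP (fun p => PySem.Str.isIn "?" p.2)) ≤ answers.length
instance (contexts : List (Int × String)) (questions : List (Int × String)) (answers : List String) : Decidable (Pre_construct_example contexts questions answers) := by unfold Pre_construct_example; infer_instance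
def pvWitness_construct_example : (List (Int × String)) × (List (Int × String)) × List String :=
  ([(2, "Sun is hot."), (1, "Sky is blue.")], [(3, "Is sun hot?")], ["yes"])

def Spec_construct_example (contexts : List (Int × String)) (questions : List (Int × String)) (answers : List String) (out : String × String) : Prop := out = construct_example_alt contexts questions answers
instance (contexts : List (Int × String)) (questions : List (Int × String)) (answers : List String) (out : String × String) : Decidable (Spec_construct_example contexts questions answers out) := by unfold Spec_construct_example; infer_instance

-- ===== CLAIM (what is proved, stated in full; the proofs are below) =====
def Claim_equal_construct_example : Prop := ∀ (contexts : List (Int × String)) (questions : List (Int × String)) (answers : List String), Dom_construct_example contexts questions answers → Pre_construct_example contexts questions answers → Spec_construct_example contexts questions answers (construct_example contexts questions answers)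

-- ===== LEMMAS AND PROOFS =====

-- proof-side recursive view of B's segmentation
def pvIsQ (p : Int × String) : Bool := PySem.Str.isIn "?" p.2

def pvSegs : List (Int × String) → List (Int × String) → List (List (Int × String) × (Int × String))
  | [], _ => []
  | l :: ls, cur => if pvIsQ l then (cur, l) :: pvSegs ls [] else pvSegs ls (cur ++ [l])

def pvFin : List (Int × String) → List (Int × String) → List (Int × String)
  | [], cur => cur
  | l :: ls, cur => if pvIsQ l then pvFin ls [] else pvFin ls (cur ++ [l])

-- the blocks of the closed segments, consuming answers from the front (A's view)
def pvBlocksE : List String → List (List (Int × String) × (Int × String)) → List String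
  | _, [] => []
  | ans, (c, q) :: ss =>
      (pvCtxE c ++ ("Question:\n" ++ PySem.Int.toStr q.1 ++ ". " ++ q.2 ++ "\n" ++ ("Answer: " ++ ans.headD ""))) :: pvBlocksE ans.tail ss

def pvBlocksP : List String → List (List (Int × String) × (Int × String)) → List String
  | _, [] => []
  | ans, (c, q) :: ss =>
      (pvCtxP c ++ ("Question:\n" ++ q.2 ++ "\n" ++ ("Answer: " ++ ans.headD ""))) :: pvBlocksP ans.tail ss

theorem join0_concat (xs : List String) (y : String) :
    PySem.Str.join "" (xs ++ [y]) = PySem.Str.join "" xs ++ y := by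
  have hl : ∀ (ts : List (List Char)) (z : List Char),
      PySem.Chars.join [] (ts ++ [z]) = PySem.Chars.join [] ts ++ z := by
    intro ts z
    induction ts with
    | nil => simp [PySem.Chars.join_nil, PySem.Chars.join_singleton]
    | cons a ts ih =>
      cases ts with
      | nil => simp [PySem.Chars.join_singleton, PySem.Chars.join_cons_cons]
      | cons b ts => simp only [List.cons_append, PySem.Chars.join_cons_cons] at ih ⊢; simp [ih]
  have h1 : (PySem.Str.join "" (xs ++ [y])).toList = (PySem.Str.join "" xs ++ y).toList := by
    simp [pysem, String.toList_append]
    exact hl (xs.map String.toList) y.toList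
  calc PySem.Str.join "" (xs ++ [y]) = String.ofList (PySem.Str.join "" (xs ++ [y])).toList := String.ofList_toList.symm
    _ = String.ofList (PySem.Str.join "" xs ++ y).toList := by rw [h1]
    _ = _ := String.ofList_toList

theorem appendLast_concat (l : List String) (x s : String) :
    pvAppendLast (l ++ [x]) s = l ++ [x ++ s] := by
  induction l with
  | nil => simp [pvAppendLast]
  | cons a l ih =>
    cases l with
    | nil => simp [pvAppendLast]
    | cons b l => simpa [pvAppendLast] using ih

theorem ctxE_ne_empty (c : Int × String) (cs : List (Int × String)) : pvCtxE (c :: cs) ≠ "" := by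
  intro h
  have := congrArg String.length h
  simp [pvCtxE, String.length_append] at this

theorem ctxE_concat (c : Int × String) (cs : List (Int × String)) (l : Int × String) :
    pvCtxE (c :: (cs ++ [l])) = pvCtxE (c :: cs) ++ (PySem.Int.toStr l.1 ++ ". " ++ l.2 ++ "\n") := by
  simp [pvCtxE, String.append_assoc]
  rw [← List.cons_append, join0_concat]

theorem ctxP_concat (c : Int × String) (cs : List (Int × String)) (l : Int × String) :
    pvCtxP (c :: (cs ++ [l])) = pvCtxP (c :: cs) ++ (l.2 ++ "\n") := by
  simp [pvCtxP, String.append_assoc]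
  rw [← List.cons_append, join0_concat]

theorem join0_singleton (y : String) : PySem.Str.join "" [y] = y := by
  simp [PySem.Str.join, PySem.Chars.join, List.intercalate]

theorem seg_fold (lines : List (Int × String)) :
    ∀ (segs0 : List (List (Int × String) × Option (Int × String))) (cur : List (Int × String)),
    lines.foldl pvSegStep (segs0, cur) =
      (segs0 ++ (pvSegs lines cur).map (fun s => (s.1, some s.2)), pvFin lines cur) := by
  induction lines with
  | nil => intro segs0 cur; simp [pvSegs, pvFin]
  | cons l ls ih =>
    intro segs0 cur
    rw [List.foldl_cons]
    by_cases hq : PySem.Chars.isIn ['?'] l.2.toList = true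
    · simp [pvSegStep, pvSegs, pvFin, pvIsQ, hq, ih]
    · simp [pvSegStep, pvSegs, pvFin, pvIsQ, hq, ih]

theorem Aloop (lines : List (Int × String)) :
    ∀ (ans de dn : List String) (cur : List (Int × String)),
    lines.foldl construct_exampleStep (ans, de ++ [pvCtxE cur], dn ++ [pvCtxP cur]) =
      (ans.drop (pvSegs lines cur).length,
       de ++ pvBlocksE ans (pvSegs lines cur) ++ [pvCtxE (pvFin lines cur)],
       dn ++ pvBlocksP ans (pvSegs lines cur) ++ [pvCtxP (pvFin lines cur)]) := by
  induction lines with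
  | nil => intro ans de dn cur; simp [pvSegs, pvFin, pvBlocksE, pvBlocksP]
  | cons l ls ih =>
    intro ans de dn cur
    rw [List.foldl_cons]
    by_cases hq : PySem.Chars.isIn ['?'] l.2.toList = true
    · have hstep : construct_exampleStep (ans, de ++ [pvCtxE cur], dn ++ [pvCtxP cur]) l =
        (ans.tail,
         (de ++ [pvCtxE cur ++ ("Question:\n" ++ PySem.Int.toStr l.1 ++ ". " ++ l.2 ++ "\n" ++ ("Answer: " ++ ans.headD ""))]) ++ [pvCtxE []],
         (dn ++ [pvCtxP cur ++ ("Question:\n" ++ l.2 ++ "\n" ++ ("Answer: " ++ ans.headD ""))]) ++ [pvCtxP []]) := by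
        simp [construct_exampleStep, hq, appendLast_concat, pvCtxE, pvCtxP, String.append_assoc]
      rw [hstep, ih]
      simp [pvSegs, pvFin, pvBlocksE, pvBlocksP, pvIsQ, hq, List.drop_tail]
    · have hq' : pvIsQ l = false := by simp [pvIsQ, hq]
      cases cur with
      | nil =>
        have hstep : construct_exampleStep (ans, de ++ [pvCtxE []], dn ++ [pvCtxP []]) l =
            (ans, de ++ [pvCtxE [l]], dn ++ [pvCtxP [l]]) := by
          simp [construct_exampleStep, hq, appendLast_concat, pvCtxE, pvCtxP, join0_singleton,
                String.append_assoc, String.empty_append]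
        rw [hstep, ih]
        simp [pvSegs, pvFin, pvIsQ, hq]
      | cons c cs =>
        have hne := ctxE_ne_empty c cs
        have hstep : construct_exampleStep (ans, de ++ [pvCtxE (c :: cs)], dn ++ [pvCtxP (c :: cs)]) l =
            (ans, de ++ [pvCtxE (c :: (cs ++ [l]))], dn ++ [pvCtxP (c :: (cs ++ [l]))]) := by
          simp [construct_exampleStep, hq, appendLast_concat, hne, ctxE_concat, ctxP_concat]
        rw [hstep, ih]
        simp [pvSegs, pvFin, pvIsQ, hq]

theorem str_merge_answer (x : String) : ("\nAnswer: " : String) ++ x = "\n" ++ ("Answer: " ++ x) := by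
  rw [← String.append_assoc]
  exact congrArg (· ++ x) (by decide)

theorem Bblocks (ss : List (List (Int × String) × (Int × String))) :
    ∀ (ans : List String) (k : Nat),
    (PySem.List.enumerate (ss.map (fun s => (s.1, some s.2))) (k : Int)).map (pvBlockE ans) =
      pvBlocksE (ans.drop k) ss := by
  induction ss with
  | nil => intro ans k; simp [pvBlocksE, PySem.List.enumerate_nil]
  | cons s ss ih =>
    intro ans k
    obtain ⟨c, q⟩ := s
    rw [List.map_cons, PySem.List.enumerate_cons, List.map_cons]
    have htail : ((k : Int) + 1) = ((k + 1 : Nat) : Int) := by push_cast; ring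
    rw [htail, ih ans (k + 1)]
    simp [pvBlockE, pvBlocksE, List.tail_drop, String.append_assoc, str_merge_answer]

theorem BblocksP (ss : List (List (Int × String) × (Int × String))) :
    ∀ (ans : List String) (k : Nat),
    (PySem.List.enumerate (ss.map (fun s => (s.1, some s.2))) (k : Int)).map (pvBlockP ans) =
      pvBlocksP (ans.drop k) ss := by
  induction ss with
  | nil => intro ans k; simp [pvBlocksP, PySem.List.enumerate_nil]
  | cons s ss ih =>
    intro ans k
    obtain ⟨c, q⟩ := s
    rw [List.map_cons, PySem.List.enumerate_cons, List.map_cons]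
    have htail : ((k : Int) + 1) = ((k + 1 : Nat) : Int) := by push_cast; ring
    rw [htail, ih ans (k + 1)]
    simp [pvBlockP, pvBlocksP, List.tail_drop, String.append_assoc, str_merge_answer]

-- ===== VERDICT (by name: the statement is the Claim_ definition above) =====
theorem construct_example_spec : Claim_equal_construct_example := by
  intro contexts questions answers _ _
  unfold Spec_construct_example
  set lines := PySem.List.sorted2 (contexts ++ questions) (fun p => p.1) (fun p => p.2) false with hl
  have hA : construct_example contexts questions answers =
      (PySem.Str.join "\n\n" (pvBlocksE answers (pvSegs lines []) ++ [pvCtxE (pvFin lines [])]),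
       PySem.Str.join "\n\n" (pvBlocksP answers (pvSegs lines []) ++ [pvCtxP (pvFin lines [])])) := by
    show (PySem.Str.join "\n\n" ((List.foldl construct_exampleStep (answers, [] ++ [pvCtxE []], [] ++ [pvCtxP []]) lines).2.1),
          PySem.Str.join "\n\n" ((List.foldl construct_exampleStep (answers, [] ++ [pvCtxE []], [] ++ [pvCtxP []]) lines).2.2)) = _
    rw [Aloop lines answers [] [] []]
    simp only [List.nil_append]
  have hB : construct_example_alt contexts questions answers =
      (PySem.Str.join "\n\n" (pvBlocksE answers (pvSegs lines []) ++ [pvCtxE (pvFin lines [])]),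
       PySem.Str.join "\n\n" (pvBlocksP answers (pvSegs lines []) ++ [pvCtxP (pvFin lines [])])) := by
    show (PySem.Str.join "\n\n" ((PySem.List.enumerate ((List.foldl pvSegStep ([], []) lines).1 ++ [((List.foldl pvSegStep ([], []) lines).2, none)]) 0).map (pvBlockE answers)),
          PySem.Str.join "\n\n" ((PySem.List.enumerate ((List.foldl pvSegStep ([], []) lines).1 ++ [((List.foldl pvSegStep ([], []) lines).2, none)]) 0).map (pvBlockP answers))) = _
    rw [seg_fold lines [] []]
    simp only [List.nil_append]
    rw [PySem.List.enumerate_append]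
    simp only [List.map_append]
    rw [show ((0 : Int)) = ((0 : Nat) : Int) from rfl, Bblocks, BblocksP]
    simp [pvBlockE, pvBlockP, PySem.List.enumerate_cons, PySem.List.enumerate_nil]
  rw [hA, hB]
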